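-- pv_equiv track=rewrite | github.com/hevji/cow-audio | cow_format.py | _undo_delta
-- ===== SOURCE A (Python) =====
-- def _undo_delta(deltas, channels):
--     out = list(deltas)
--     cur = [0] * channels
--     for i, d in enumerate(deltas):
--         ch     = i % channels
--         cur[ch] = (cur[ch] + d) & 0xFFFF
--         val    = cur[ch]
--         if val >= 0x8000:
--             val -= 0x10000
--         out[i] = val
--     return out
-- ===== SOURCE B (Python) =====
-- def _undo_delta(deltas, channels):
--     if not deltas:
--         return []
--     # partition into per-channel columns, accumulate each, then re-interleave
--     cols = [deltas[c::channels] for c in range(channels)]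
--     outcols = []
--     for col in cols:
--         acc = 0
--         res = []
--         for d in col:
--             acc = (acc + d) & 0xFFFF
--             res.append(acc - 0x10000 if acc >= 0x8000 else acc)
--         outcols.append(res)
--     return [outcols[i % channels][i // channels] for i in range(len(deltas))]
-- ===== Notes on version B (the rewrite author's own statement) =====
-- stated objective: alternative
-- what changed: Replaces A's single interleaved pass over a mutable per-channel accumulator array with a partition into per-channel columns via extended slices, an independent cumulative mask/fixup scan down each column, and a final re-interleave by index.
import Mathlib
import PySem

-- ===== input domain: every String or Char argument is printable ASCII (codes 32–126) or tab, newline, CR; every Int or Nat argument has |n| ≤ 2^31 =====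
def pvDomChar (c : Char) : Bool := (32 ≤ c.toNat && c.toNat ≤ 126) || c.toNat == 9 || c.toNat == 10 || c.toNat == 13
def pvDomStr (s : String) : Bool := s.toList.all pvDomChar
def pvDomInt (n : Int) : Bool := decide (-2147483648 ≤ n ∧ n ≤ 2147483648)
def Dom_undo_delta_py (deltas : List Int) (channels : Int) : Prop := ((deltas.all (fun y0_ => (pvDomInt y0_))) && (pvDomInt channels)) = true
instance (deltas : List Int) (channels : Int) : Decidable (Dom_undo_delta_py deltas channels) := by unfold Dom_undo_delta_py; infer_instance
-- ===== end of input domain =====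

-- B replaces A's single interleaved stateful pass by: partition into per-channel columns,
-- run the cumulative mask/fixup down each column, then re-interleave (objective: alternative).

-- ===== PORT A =====
-- loop body of A (one step of 'for i, d in enumerate(deltas)')
def pvStepA (channels : Int) (st : List Int × List Int) (p : Int × Int) : List Int × List Int :=
  let ch := PySem.Int.mod p.1 channels
  let cur1 := PySem.List.pySetD st.2 ch (PySem.Int.band (PySem.List.pyGetD st.2 ch 0 + p.2) 0xFFFF)
  let val := PySem.List.pyGetD cur1 ch 0
  let val := if val ≥ 0x8000 then val - 0x10000 else val
  (PySem.List.pySetD st.1 p.1 val, cur1)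

def undo_delta_py (deltas : List Int) (channels : Int) : List Int :=
  ((PySem.List.enumerate deltas).foldl (pvStepA channels)
    (deltas, List.replicate channels.toNat 0)).1

-- ===== PORT B =====
-- deltas[c::channels]: extended slice, ported by hand (exact for 0 ≤ c and step ≥ 1,
-- which Pre_ guarantees here); takes every k-th element.
def pvTakeStep (xs : List Int) (k : Nat) : List Int :=
  match xs with
  | [] => []
  | x :: rest => x :: pvTakeStep (rest.drop (k-1)) k
termination_by xs.length
decreasing_by simp

-- inner loop of B: running masked sum with signed fixup down one column
def pvColAcc (acc : Int) : List Int → List Int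
  | [] => []
  | d :: rest =>
    let a := PySem.Int.band (acc + d) 0xFFFF
    (if a ≥ 0x8000 then a - 0x10000 else a) :: pvColAcc a rest

def undo_delta_py_alt (deltas : List Int) (channels : Int) : List Int :=
  if deltas = [] then []
  else
    let cols := (List.range channels.toNat).map (fun c => pvTakeStep (deltas.drop c) channels.toNat)
    let outcols := cols.map (pvColAcc 0)
    (List.range deltas.length).map (fun (i : Nat) =>
      PySem.List.pyGetD (PySem.List.pyGetD outcols (PySem.Int.mod (i : Int) channels) [])
        (PySem.Int.floordiv (i : Int) channels) 0)

-- ===== PRECONDITION & SPEC =====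
-- On nonempty deltas with channels ≤ 0 the Python A raises (ZeroDivisionError for
-- channels == 0, IndexError for channels < 0); those inputs are excluded.
def Pre_undo_delta_py (deltas : List Int) (channels : Int) : Prop := deltas = [] ∨ 1 ≤ channels
instance (deltas : List Int) (channels : Int) : Decidable (Pre_undo_delta_py deltas channels) := by unfold Pre_undo_delta_py; infer_instance
def pvWitness_undo_delta_py : List Int × Int := ([3, -5, 70000, 2, 40000], 2)

def Spec_undo_delta_py (deltas : List Int) (channels : Int) (out : List Int) : Prop := out = undo_delta_py_alt deltas channels
instance (deltas : List Int) (channels : Int) (out : List Int) : Decidable (Spec_undo_delta_py deltas channels out) := by unfold Spec_undo_delta_py; infer_instance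

-- ===== CLAIM (what is proved, stated in full; the proofs are below) =====
def Claim_equal_undo_delta_py : Prop := ∀ (deltas : List Int) (channels : Int), Dom_undo_delta_py deltas channels → Pre_undo_delta_py deltas channels → Spec_undo_delta_py deltas channels (undo_delta_py deltas channels)

-- ===== LEMMAS AND PROOFS =====

-- one masking step and the signed fixup, as both programs compute them
def pvMstep (a d : Int) : Int := PySem.Int.band (a + d) 0xFFFF
def pvFix (a : Int) : Int := if a ≥ 0x8000 then a - 0x10000 else a

-- the channel-(j % K) deltas at positions ≤ j, in order
def pvSel (ds : List Int) (K j : Nat) : List Int :=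
  (List.range (j/K + 1)).map (fun t => ds.getD (j%K + t*K) 0)

-- A's loop, rephrased as a structural recursion producing the output list directly
def pvBuild (K : Nat) : List Int → Nat → List Int → List Int
  | _, _, [] => []
  | cur, s, d :: ds =>
    let a := pvMstep (cur.getD (s % K) 0) d
    pvFix a :: pvBuild K (cur.set (s % K) a) (s+1) ds

lemma pvSuccMod0 (j K : Nat) (hK : 1 ≤ K) (h : (j+1) % K = 0) :
    j % K = K - 1 ∧ (j+1)/K = j/K + 1 := by
  have hd := Nat.div_add_mod j K
  have hr : j % K < K := Nat.mod_lt _ hK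
  by_cases hc : j % K + 1 = K
  · refine ⟨by omega, ?_⟩
    have h1 : j + 1 = K * (j/K + 1) := by rw [Nat.mul_add, Nat.mul_one]; omega
    rw [h1, Nat.mul_div_cancel_left _ (by omega : 0 < K)]
  · exfalso
    have h1 : j + 1 = K * (j/K) + (j % K + 1) := by omega
    rw [h1, Nat.mul_add_mod_self_left, Nat.mod_eq_of_lt (by omega)] at h
    omega

lemma pvSuccModPos (j K : Nat) (hK : 1 ≤ K) (h : (j+1) % K ≠ 0) :
    (j+1) % K = j % K + 1 ∧ (j+1)/K = j/K := by
  have hd := Nat.div_add_mod j K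
  have hr : j % K < K := Nat.mod_lt _ hK
  have h1 : j + 1 = K * (j/K) + (j % K + 1) := by omega
  by_cases hc : j % K + 1 = K
  · exfalso
    rw [h1, hc, ← Nat.mul_succ, Nat.mul_mod_right] at h; omega
  · constructor
    · rw [h1, Nat.mul_add_mod_self_left, Nat.mod_eq_of_lt (by omega)]
    · rw [h1, Nat.mul_add_div (by omega : 0 < K)]
      have h2 : (j % K + 1) / K = 0 := Nat.div_eq_of_lt (by omega)
      omega

lemma pvAddModCancel (s m K : Nat) (h : (s + m) % K = s % K) : m % K = 0 := by
  have h2 : (s + m) % K = (s + 0) % K := by simpa using h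
  have := Nat.ModEq.add_left_cancel' s h2
  simpa [Nat.ModEq] using this

lemma pvSel_zero (ds : List Int) (K : Nat) (hK : 1 ≤ K) : pvSel ds K 0 = [ds.getD 0 0] := by
  simp [pvSel, Nat.div_eq_of_lt hK, Nat.mod_eq_of_lt hK, List.range_succ]

lemma pvSel_cons_zero (d : Int) (ds : List Int) (K j : Nat) (hK : 1 ≤ K) (h : (j+1) % K = 0) :
    pvSel (d :: ds) K (j+1) = d :: pvSel ds K j := by
  obtain ⟨hj, hdiv⟩ := pvSuccMod0 j K hK h
  unfold pvSel
  rw [h, hdiv, List.range_succ_eq_map, List.map_cons, List.map_map]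
  refine congrArg₂ List.cons (by simp) ?_
  refine List.map_congr_left (fun t _ => ?_)
  have e : (t+1)*K = t*K + K := by ring
  have e2 : 0 + (t+1)*K = (j % K + t*K) + 1 := by omega
  simp only [Function.comp, Nat.succ_eq_add_one, e2, List.getD_cons_succ]

lemma pvSel_cons_pos (d : Int) (ds : List Int) (K j : Nat) (hK : 1 ≤ K) (h : (j+1) % K ≠ 0) :
    pvSel (d :: ds) K (j+1) = pvSel ds K j := by
  obtain ⟨hm, hdiv⟩ := pvSuccModPos j K hK h
  unfold pvSel
  rw [hm, hdiv]
  refine List.map_congr_left (fun t _ => ?_)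
  have e2 : j % K + 1 + t*K = (j % K + t*K) + 1 := by omega
  rw [e2, List.getD_cons_succ]

lemma pvSetTake (l : List Int) (n : Nat) (h : n < l.length) (v : Int) :
    (l.set n v).take (n+1) = l.take n ++ [v] := by
  rw [List.set_eq_take_append_cons_drop, if_pos h]
  have hl : (l.take n).length = n := List.length_take_of_le (Nat.le_of_lt h)
  rw [show n + 1 = (l.take n).length + 1 by rw [hl]]
  rw [List.take_append]
  simp

-- A's fold equals pvBuild
lemma pvFoldA (K : Nat) (hK : 1 ≤ K) (ds : List Int) : ∀ (s : Nat) (out cur : List Int),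
    out.length = s + ds.length → cur.length = K →
    ((PySem.List.enumerate ds (s : Int)).foldl (pvStepA (K : Int)) (out, cur)).1 =
      out.take s ++ pvBuild K cur s ds := by
  induction ds with
  | nil =>
    intro s out cur hout hcur
    simp at hout
    simp [pvBuild, PySem.List.enumerate_nil, List.take_of_length_le (Nat.le_of_eq hout)]
  | cons d ds ih =>
    intro s out cur hout hcur
    have hm : s % K < K := Nat.mod_lt _ (by omega)
    have hsl : s < out.length := by simp at hout; omega
    rw [PySem.List.enumerate_cons, List.foldl_cons]
    have hstep : pvStepA (K : Int) (out, cur) ((s : Int), d) =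
        (out.set s (pvFix (pvMstep (cur.getD (s % K) 0) d)),
         cur.set (s % K) (pvMstep (cur.getD (s % K) 0) d)) := by
      simp only [pvStepA, pvFix, pvMstep, PySem.Int.mod_natCast, PySem.List.pySetD_natCast,
        PySem.List.pyGetD_natCast]
      rw [List.getD_eq_getElem _ _ (by simp [hcur, hm]),
          List.getElem_set_self (by simp [hcur, hm])]
    rw [hstep, show (s : Int) + 1 = ((s + 1 : Nat) : Int) by push_cast; ring]
    rw [ih (s+1) _ _ (by simp [hout]; omega) (by simp [hcur])]
    rw [pvSetTake out s hsl, pvBuild]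
    simp

-- pvBuild, characterised pointwise by per-channel prefixes
lemma pvBuild_eq (K : Nat) (hK : 1 ≤ K) : ∀ (ds : List Int) (s : Nat) (cur : List Int),
    cur.length = K →
    pvBuild K cur s ds = (List.range ds.length).map
      (fun j => pvFix (List.foldl pvMstep (cur.getD ((s+j) % K) 0) (pvSel ds K j))) := by
  intro ds
  induction ds with
  | nil => intro s cur hcur; simp [pvBuild]
  | cons d ds ih =>
    intro s cur hcur
    have hm : s % K < K := Nat.mod_lt _ (by omega)
    rw [pvBuild]
    conv_rhs => rw [List.length_cons, List.range_succ_eq_map, List.map_cons, List.map_map]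
    refine congrArg₂ List.cons ?_ ?_
    · rw [pvSel_zero _ _ hK]
      simp [pvMstep]
    · rw [ih (s+1) _ (by simp [hcur])]
      refine List.map_congr_left (fun j _ => ?_)
      simp only [Function.comp_apply, Nat.succ_eq_add_one]
      by_cases h0 : (j+1) % K = 0
      · have hmod : (s + (j+1)) % K = s % K := by
          simp [Nat.add_mod, h0]
        have hmod2 : (s + 1 + j) % K = s % K := by rw [show s+1+j = s+(j+1) by omega, hmod]
        rw [hmod2, pvSel_cons_zero d ds K j hK h0]
        rw [List.getD_eq_getElem _ _ (by simp [hcur, hm]),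
            List.getElem_set_self (by simp [hcur, hm])]
        rw [show s + (j+1) = s + 1 + j by omega, hmod2]
        simp [pvMstep]
      · have hne : (s + 1 + j) % K ≠ s % K := by
          intro hc
          exact h0 (pvAddModCancel s (j+1) K (by rw [show s+(j+1) = s+1+j by omega]; exact hc))
        rw [pvSel_cons_pos d ds K j hK h0]
        rw [show s + (j+1) = s + 1 + j by omega]
        congr 2
        simp [List.getD, List.getElem?_set_ne (fun hc => hne hc.symm)]

lemma pvColAcc_getD : ∀ (col : List Int) (acc : Int) (j : Nat), j < col.length →
    (pvColAcc acc col).getD j 0 = pvFix (List.foldl pvMstep acc (col.take (j+1))) := by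
  intro col
  induction col with
  | nil => intro acc j h; simp at h
  | cons d rest ih =>
    intro acc j h
    cases j with
    | zero => simp [pvColAcc, pvFix, pvMstep]
    | succ j =>
      simp only [pvColAcc, List.getD_cons_succ, List.take_succ_cons, List.foldl_cons]
      exact ih _ j (by simpa using h)

lemma pvTS_step (xs : List Int) (c K : Nat) (hK : 1 ≤ K) (hc : c < xs.length) :
    pvTakeStep (xs.drop c) K = xs.getD c 0 :: pvTakeStep (xs.drop (c+K)) K := by
  rw [List.drop_eq_getElem_cons hc]
  rw [pvTakeStep]
  rw [List.drop_drop]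
  rw [show c + 1 + (K - 1) = c + K by omega, List.getD_eq_getElem _ _ hc]

lemma pvTS_take (K : Nat) (hK : 1 ≤ K) : ∀ (m c : Nat) (xs : List Int), c + m*K < xs.length →
    (pvTakeStep (xs.drop c) K).take (m+1) =
      (List.range (m+1)).map (fun t => xs.getD (c + t*K) 0) := by
  intro m
  induction m with
  | zero =>
    intro c xs h
    have hc : c < xs.length := by omega
    rw [pvTS_step xs c K hK hc]
    simp [List.range_succ]
  | succ m ih =>
    intro c xs h
    have e : (m+1)*K = m*K + K := by ring
    have hc : c < xs.length := by omega
    rw [pvTS_step xs c K hK hc, List.take_succ_cons]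
    conv_rhs => rw [List.range_succ_eq_map, List.map_cons, List.map_map]
    refine congrArg₂ List.cons (by simp) ?_
    rw [ih (c+K) xs (by omega)]
    refine List.map_congr_left (fun t _ => ?_)
    have e2 : (t+1)*K = t*K + K := by ring
    have e3 : c + K + t*K = c + (t+1)*K := by omega
    simp only [Function.comp_apply, Nat.succ_eq_add_one, e3]

-- B equals the same pointwise characterisation
lemma pvAltB (deltas : List Int) (K : Nat) (hne : deltas ≠ []) (hK : 1 ≤ K) :
    undo_delta_py_alt deltas (K : Int) = (List.range deltas.length).map
      (fun i => pvFix (List.foldl pvMstep 0 (pvSel deltas K i))) := by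
  unfold undo_delta_py_alt
  rw [if_neg hne]
  simp only [Int.toNat_natCast, List.map_map]
  refine List.map_congr_left (fun i hi => ?_)
  have hin : i < deltas.length := List.mem_range.mp hi
  have hmK : i % K < K := Nat.mod_lt _ (by omega)
  simp only [PySem.Int.mod_natCast, PySem.Int.floordiv_natCast, PySem.List.pyGetD_natCast]
  rw [PySem.List.getD_map_range _ _ _ _ hmK]
  have hlt : i % K + (i / K) * K < deltas.length := by
    rw [Nat.mod_add_div']; exact hin
  have htake := pvTS_take K hK (i / K) (i % K) deltas hlt
  have hjlen : i / K < (pvTakeStep (deltas.drop (i % K)) K).length := by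
    have h1 := congrArg List.length htake
    simp [List.length_take] at h1
    omega
  rw [Function.comp_apply, pvColAcc_getD _ 0 _ hjlen, htake]
  rfl

-- ===== VERDICT (by name: the statement is the Claim_ definition above) =====
theorem undo_delta_py_spec : Claim_equal_undo_delta_py := by
  intro deltas channels _ hpre
  unfold Spec_undo_delta_py
  by_cases hd : deltas = []
  · subst hd
    simp [undo_delta_py, undo_delta_py_alt, PySem.List.enumerate_nil]
  · have hch : 1 ≤ channels := hpre.resolve_left hd
    set K := channels.toNat with hKdef
    have hK : 1 ≤ K := by omega
    have hcast : (K : Int) = channels := Int.toNat_of_nonneg (by omega)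
    rw [← hcast]
    unfold undo_delta_py
    have h0 : (0 : Int) = ((0 : Nat) : Int) := by simp
    rw [show PySem.List.enumerate deltas (0 : Int) = PySem.List.enumerate deltas (((0:Nat) : Int)) by rw [← h0]]
    rw [Int.toNat_natCast]
    rw [pvFoldA K hK deltas 0 deltas (List.replicate K 0) (by simp) (by simp)]
    rw [List.take_zero, List.nil_append]
    rw [pvBuild_eq K hK deltas 0 _ (by simp)]
    rw [pvAltB deltas K hd hK]
    refine List.map_congr_left (fun j _ => ?_)
    simp [List.getD]
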